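-- pv_equiv track=rewrite | github.com/BrianMills2718/agent_ontology | agent_ontology/verify.py | check_store_consistency
-- ===== SOURCE A (Python) =====
-- from collections import defaultdict, deque
--
-- def _reachable_from(start: str, adj: dict[str, list[str]]) -> set[str]:
--     """BFS reachability from a start node."""
--     visited: set[str] = set()
--     queue = deque([start])
--     while queue:
--         node = queue.popleft()
--         if node in visited:
--             continue
--         visited.add(node)
--         for nbr in adj.get(node, []):
--             if nbr not in visited:
--                 queue.append(nbr)
--     return visited
--
-- def check_store_consistency(spec: dict, entities: dict, processes: dict, schemas: dict,
--                             edges: list, fwd: dict, rev: dict) -> tuple[list[str], list[str]]: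
--     """V004: Store read edges are preceded by write edges to the same store."""
--     errors, warnings = [], []
--     entry = spec.get("entry_point", "")
--
--     # Collect read and write edges per store
--     store_reads: dict[str, list[str]] = defaultdict(list)  # store_id -> [process_ids]
--     store_writes: dict[str, list[str]] = defaultdict(list)
--
--     for e in edges:
--         if not isinstance(e, dict):
--             continue
--         etype = e.get("type", "")
--         src = e.get("from", "")
--         tgt = e.get("to", "")
--         if etype == "read" and tgt in entities and entities[tgt].get("type") in ("store",):
--             store_reads[tgt].append(src)
--         elif etype == "write" and tgt in entities and entities[tgt].get("type") in ("store",):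
--             store_writes[tgt].append(src)
--
--     if not store_reads:
--         return errors, warnings
--
--     # For each store that has reads, check if a write precedes it
--     for store_id, readers in store_reads.items():
--         writers = store_writes.get(store_id, [])
--         if not writers:
--             # Store might be pre-populated (e.g., document store for RAG)
--             store_type = entities.get(store_id, {}).get("store_type", "")
--             if store_type in ("vector", "document", "knowledge_base"):
--                 continue  # These are often pre-populated
--             warnings.append(f"V004: Store '{store_id}' is read by "
--                             f"{readers} but never written to in this spec")
--             continue
--
--         if not entry:
--             continue
--
--         # Check if any writer is reachable before any reader
--         for reader_pid in readers:
--             reader_predecessors = _reachable_from(reader_pid, rev)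
--             writer_reachable_before = False
--             for writer_pid in writers:
--                 if writer_pid in reader_predecessors:
--                     writer_reachable_before = True
--                     break
--             if not writer_reachable_before:
--                 # Could be in same loop body (write and read in same cycle)
--                 warnings.append(f"V004: Process '{reader_pid}' reads from store "
--                                 f"'{store_id}' but no write to that store is "
--                                 f"guaranteed to precede it")
--
--     return errors, warnings
-- ===== SOURCE B (Python) =====
-- def check_store_consistency(spec: dict, entities: dict, processes: dict, schemas: dict,
--                             edges: list, fwd: dict, rev: dict) -> tuple[list[str], list[str]]:
--     """V004: Store read edges are preceded by write edges to the same store.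
--
--     Re-implementation: flatten the edges into a list of (type, store, src) store events,
--     scan it per store, and decide reachability by saturating a 'can reach a writer via
--     rev-edges' set to a fixpoint (chaotic iteration) instead of BFS per reader.
--     """
--     errors, warnings = [], []
--     entry = spec.get("entry_point", "")
--
--     def is_store(t):
--         return t in entities and entities[t].get("type") == "store"
--
--     events = [(e.get("type", ""), e.get("to", ""), e.get("from", ""))
--               for e in edges if isinstance(e, dict)]
--     events = [v for v in events if v[0] in ("read", "write") and is_store(v[1])]
--
--     read_stores: list[str] = []
--     for k, t, _ in events:
--         if k == "read" and t not in read_stores: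
--             read_stores.append(t)
--
--     if not read_stores:
--         return errors, warnings
--
--     for store_id in read_stores:
--         warnings += _store_warnings(store_id, events, entities, entry, rev)
--     return errors, warnings
--
--
-- def _store_warnings(store_id, events, entities, entry, rev):
--     readers = [s for (k, t, s) in events if k == "read" and t == store_id]
--     writers = [s for (k, t, s) in events if k == "write" and t == store_id]
--     if not writers:
--         if entities.get(store_id, {}).get("store_type", "") in ("vector", "document", "knowledge_base"):
--             return []  # often pre-populated
--         return [f"V004: Store '{store_id}' is read by "
--                 f"{readers} but never written to in this spec"]
--     if not entry:
--         return []
--     # covered = nodes with a rev-path to some writer, by fixpoint saturation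
--     covered = set(writers)
--     changed = True
--     while changed:
--         changed = False
--         for node, nbrs in rev.items():
--             if node not in covered and any(n in covered for n in nbrs):
--                 covered.add(node)
--                 changed = True
--     return [f"V004: Process '{r}' reads from store "
--             f"'{store_id}' but no write to that store is "
--             f"guaranteed to precede it"
--             for r in readers if r not in covered]
-- ===== Notes on version B (the rewrite author's own statement) =====
-- stated objective: alternative
-- what changed: B replaces A's two grouping dicts and per-reader BFS over rev by a flat (type,store,src) event list scanned per store, and decides reachability with a single fixpoint saturation ('can reach a writer via rev-edges') per store instead of one BFS per reader with an inner writer scan.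
import Mathlib
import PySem

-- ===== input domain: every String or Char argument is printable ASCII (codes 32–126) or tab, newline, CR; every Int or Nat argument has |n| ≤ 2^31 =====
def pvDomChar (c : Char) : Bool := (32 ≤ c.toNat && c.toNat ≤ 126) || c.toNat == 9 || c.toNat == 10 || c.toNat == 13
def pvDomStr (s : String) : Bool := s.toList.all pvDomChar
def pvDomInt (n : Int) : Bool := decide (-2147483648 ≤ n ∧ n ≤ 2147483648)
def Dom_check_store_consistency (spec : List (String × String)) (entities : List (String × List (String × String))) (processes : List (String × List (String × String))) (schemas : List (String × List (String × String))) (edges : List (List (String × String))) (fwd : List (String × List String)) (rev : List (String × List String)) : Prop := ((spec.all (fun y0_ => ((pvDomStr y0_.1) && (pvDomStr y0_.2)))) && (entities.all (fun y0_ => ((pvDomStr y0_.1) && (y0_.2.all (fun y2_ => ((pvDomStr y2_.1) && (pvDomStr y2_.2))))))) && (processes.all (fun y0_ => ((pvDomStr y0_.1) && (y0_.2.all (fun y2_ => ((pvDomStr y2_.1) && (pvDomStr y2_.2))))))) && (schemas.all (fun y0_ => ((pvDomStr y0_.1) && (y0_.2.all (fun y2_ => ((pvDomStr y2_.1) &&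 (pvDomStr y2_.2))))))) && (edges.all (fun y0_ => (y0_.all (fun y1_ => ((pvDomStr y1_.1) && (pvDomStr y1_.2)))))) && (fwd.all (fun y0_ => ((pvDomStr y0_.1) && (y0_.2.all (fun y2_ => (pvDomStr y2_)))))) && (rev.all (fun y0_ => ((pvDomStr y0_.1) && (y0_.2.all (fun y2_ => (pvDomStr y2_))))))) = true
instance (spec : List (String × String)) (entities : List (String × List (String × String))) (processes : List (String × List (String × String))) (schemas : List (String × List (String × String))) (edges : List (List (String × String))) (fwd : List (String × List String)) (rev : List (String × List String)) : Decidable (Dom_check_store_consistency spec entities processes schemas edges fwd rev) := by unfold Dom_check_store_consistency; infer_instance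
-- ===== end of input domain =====

-- B flattens the edges into a (type, store, src) event list scanned per store and decides
-- reachability by saturating a "reaches a writer via rev-edges" set to a fixpoint instead
-- of A's grouping dicts and per-reader BFS (objective: alternative).


-- ===== PORT A =====

-- d.get(k, dflt) / d.get(k) on a Python dict given as its items list (first-match lookup)
def dGetD {ν : Type} (d : List (String × ν)) (k : String) (dflt : ν) : ν :=
  (PySem.Dict.mk d).getD k dflt
def dGet? {ν : Type} (d : List (String × ν)) (k : String) : Option ν :=
  (PySem.Dict.mk d).get? k

-- `tgt in entities and entities[tgt].get("type") in ("store",)` (== "store" in B; same test)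
def isStoreEnt (entities : List (String × List (String × String))) (tgt : String) : Bool :=
  match dGet? entities tgt with
  | some ent => dGet? ent "type" == some "store"
  | none => false

-- repr(s): hand port (no PySem primitive); exact for the Dom alphabet
-- (printable ASCII plus tab/newline/CR): quote choice, backslash/quote/\t/\n/\r escapes.
def pyReprStr (s : String) : String :=
  let cs := s.toList
  let q : Char := if cs.contains '\'' && !(cs.contains '"') then '"' else '\''
  String.ofList (q :: (cs.flatMap (fun c =>
    if c = '\\' then ['\\', '\\']
    else if c = q then ['\\', q]
    else if c = '\t' then ['\\', 't']
    else if c = '\n' then ['\\', 'n']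
    else if c = '\r' then ['\\', 'r']
    else [c])) ++ [q])

-- f"{readers}" where readers is a list of str
def pyReprStrList (xs : List String) : String :=
  "[" ++ PySem.Str.join ", " (xs.map pyReprStr) ++ "]"

def msgNeverWritten (store_id : String) (readers : List String) : String :=
  "V004: Store '" ++ store_id ++ "' is read by " ++ pyReprStrList readers ++
    " but never written to in this spec"

def msgNoPrecede (reader_pid store_id : String) : String :=
  "V004: Process '" ++ reader_pid ++ "' reads from store '" ++ store_id ++
    "' but no write to that store is guaranteed to precede it"

-- the while-queue loop of _reachable_from; fuel-indexed, called with enough fuel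
-- for the queue to drain (see bfsFuel)
def bfsLoop (adj : List (String × List String)) : Nat → List String → PySem.Set String → PySem.Set String
  | 0, _, vis => vis
  | _ + 1, [], vis => vis
  | fuel + 1, node :: queue, vis =>
    if PySem.Set.contains vis node then bfsLoop adj fuel queue vis
    else
      let vis' := PySem.Set.add vis node
      bfsLoop adj fuel
        (queue ++ (dGetD adj node []).filter (fun nbr => !(PySem.Set.contains vis' nbr))) vis'

-- an upper bound on the number of loop iterations: initial queue + every possible append
def bfsFuel (adj : List (String × List String)) (seeds : List String) : Nat :=
  seeds.length + (adj.map (fun p => p.2.length)).sum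

def reachableFrom (start : String) (adj : List (String × List String)) : PySem.Set String :=
  bfsLoop adj (bfsFuel adj [start]) [start] PySem.Set.empty

-- the edge-collection loop of A (defaultdict(list) append = modify with default [])
def collectA (entities : List (String × List (String × String))) (edges : List (List (String × String))) :
    PySem.Dict String (List String) × PySem.Dict String (List String) :=
  edges.foldl (fun rw e =>
      let etype := dGetD e "type" ""
      let src := dGetD e "from" ""
      let tgt := dGetD e "to" ""
      if etype == "read" && isStoreEnt entities tgt then
        (rw.1.modify tgt [] (fun l => l ++ [src]), rw.2)
      else if etype == "write" && isStoreEnt entities tgt then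
        (rw.1, rw.2.modify tgt [] (fun l => l ++ [src]))
      else rw)
    (PySem.Dict.empty, PySem.Dict.empty)

def check_store_consistency (spec : List (String × String)) (entities : List (String × List (String × String))) (processes : List (String × List (String × String))) (schemas : List (String × List (String × String))) (edges : List (List (String × String))) (fwd : List (String × List String)) (rev : List (String × List String)) : List String × List String :=
  let entry := dGetD spec "entry_point" ""
  let srw := collectA entities edges
  let store_reads := srw.1
  let store_writes := srw.2
  if store_reads.items.isEmpty then ([], [])
  else
    let warnings := store_reads.items.foldl (fun ws si =>
      let store_id := si.1
      let readers := si.2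
      let writers := store_writes.getD store_id []
      if writers.isEmpty then
        if (["vector", "document", "knowledge_base"] : List String).contains
            (dGetD (dGetD entities store_id []) "store_type" "") then ws
        else ws ++ [msgNeverWritten store_id readers]
      else if entry == "" then ws
      else
        readers.foldl (fun ws2 reader_pid =>
          let preds := reachableFrom reader_pid rev
          if writers.any (fun w => PySem.Set.contains preds w) then ws2
          else ws2 ++ [msgNoPrecede reader_pid store_id]) ws) []
    ([], warnings)

-- ===== PORT B =====

-- (e.get("type",""), e.get("to",""), e.get("from","")) — the flat event of one edge
def evOf (e : List (String × String)) : String × String × String :=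
  (dGetD e "type" "", dGetD e "to" "", dGetD e "from" "")

-- the two event comprehensions (every e of the Lean type is a dict, so the
-- isinstance filter keeps everything)
def storeEvents (entities : List (String × List (String × String)))
    (edges : List (List (String × String))) : List (String × String × String) :=
  (edges.map evOf).filter (fun v => (v.1 == "read" || v.1 == "write") && isStoreEnt entities v.2.1)

-- the `for k, t, _ in events: if k == "read" and t not in read_stores: append` loop
def readStoresLoop : List (String × String × String) → List String → List String
  | [], acc => acc
  | v :: rest, acc =>
    if v.1 == "read" && !(acc.contains v.2.1) then readStoresLoop rest (acc ++ [v.2.1])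
    else readStoresLoop rest acc

def readersOf (events : List (String × String × String)) (store : String) : List String :=
  (events.filter (fun v => v.1 == "read" && v.2.1 == store)).map (fun v => v.2.2)

def writersOf (events : List (String × String × String)) (store : String) : List String :=
  (events.filter (fun v => v.1 == "write" && v.2.1 == store)).map (fun v => v.2.2)

-- rev.items(): in the assoc-list encoding of a Python dict a later duplicate key is
-- shadowed under first-match lookup, so iteration keeps the first pair of each key
-- (identity on any real Python dict)
def dedupKeys (l : List (String × List String)) : List (String × List String) :=
  match l with
  | [] => []
  | p :: rest => p :: dedupKeys (rest.filter (fun q => !(q.1 == p.1)))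
  termination_by l.length
  decreasing_by simp only [List.length_cons, List.length_unattach]; exact Nat.lt_succ_of_le ((List.length_filter_le _ _).trans (by simp))

-- the body of the `for node, nbrs in rev.items()` pass
def passStep (acc : PySem.Set String × Bool) (p : String × List String) : PySem.Set String × Bool :=
  if !(PySem.Set.contains acc.1 p.1) && p.2.any (fun n => PySem.Set.contains acc.1 n) then
    (PySem.Set.add acc.1 p.1, true)
  else acc

def onePass (L : List (String × List String)) (S : PySem.Set String) : PySem.Set String × Bool :=
  L.foldl passStep (S, false)

-- the `while changed:` loop; fuel-indexed, |L|+1 passes always reach the fixpoint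
def satLoop (L : List (String × List String)) : Nat → PySem.Set String → PySem.Set String
  | 0, S => S
  | f + 1, S => let r := onePass L S; if r.2 then satLoop L f r.1 else r.1

-- _store_warnings of Source B
def storeWarnings (store_id : String) (events : List (String × String × String))
    (entities : List (String × List (String × String))) (entry : String)
    (rev : List (String × List String)) : List String :=
  let readers := readersOf events store_id
  let writers := writersOf events store_id
  if writers.isEmpty then
    if (["vector", "document", "knowledge_base"] : List String).contains
        (dGetD (dGetD entities store_id []) "store_type" "") then []
    else [msgNeverWritten store_id readers]
  else if entry == "" then []
  else
    let L := dedupKeys rev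
    let covered := satLoop L (L.length + 1) (PySem.Set.ofList writers)
    (readers.filter (fun r => !(PySem.Set.contains covered r))).map
      (fun r => msgNoPrecede r store_id)

def check_store_consistency_alt (spec : List (String × String)) (entities : List (String × List (String × String))) (processes : List (String × List (String × String))) (schemas : List (String × List (String × String))) (edges : List (List (String × String))) (fwd : List (String × List String)) (rev : List (String × List String)) : List String × List String :=
  let entry := dGetD spec "entry_point" ""
  let events := storeEvents entities edges
  let read_stores := readStoresLoop events []
  if read_stores.isEmpty then ([], [])
  else
    ([], read_stores.foldl (fun ws t => ws ++ storeWarnings t events entities entry rev) [])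

-- ===== PRECONDITION & SPEC =====
def Spec_check_store_consistency (spec : List (String × String)) (entities : List (String × List (String × String))) (processes : List (String × List (String × String))) (schemas : List (String × List (String × String))) (edges : List (List (String × String))) (fwd : List (String × List String)) (rev : List (String × List String)) (out : List String × List String) : Prop := out = check_store_consistency_alt spec entities processes schemas edges fwd rev
instance (spec : List (String × String)) (entities : List (String × List (String × String))) (processes : List (String × List (String × String))) (schemas : List (String × List (String × String))) (edges : List (List (String × String))) (fwd : List (String × List String)) (rev : List (String × List String)) (out : List String × List String) : Decidable (Spec_check_store_consistency spec entities processes schemas edges fwd rev out) := by unfold Spec_check_store_consistency; infer_instance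

-- ===== CLAIM (what is proved, stated in full; the proofs are below) =====
def Claim_equal_check_store_consistency : Prop := ∀ (spec : List (String × String)) (entities : List (String × List (String × String))) (processes : List (String × List (String × String))) (schemas : List (String × List (String × String))) (edges : List (List (String × String))) (fwd : List (String × List String)) (rev : List (String × List String)), Dom_check_store_consistency spec entities processes schemas edges fwd rev → Spec_check_store_consistency spec entities processes schemas edges fwd rev (check_store_consistency spec entities processes schemas edges fwd rev)

-- ===== LEMMAS AND PROOFS =====

-- one rev-edge: b is a predecessor of a (b ∈ rev.get(a, []))
def stepRel (adj : List (String × List String)) (a b : String) : Prop := b ∈ dGetD adj a []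

def Reach (adj : List (String × List String)) : String → String → Prop :=
  Relation.ReflTransGen (stepRel adj)

-- potential: queue length + adjacency mass of unvisited keys, bounds remaining BFS iterations
def Ssum (adj : List (String × List String)) (vis : List String) : Nat :=
  (adj.map (fun p => if vis.contains p.1 then 0 else p.2.length)).sum

theorem dGetD_nil {ν : Type} (k : String) (v : ν) : dGetD [] k v = v := rfl

theorem dGetD_cons {ν : Type} (p : String × ν) (l : List (String × ν)) (k : String) (v : ν) :
    dGetD (p :: l) k v = if p.1 == k then p.2 else dGetD l k v := by
  cases p with
  | mk a b =>
    simp only [dGetD, PySem.Dict.getD_eq_get?_getD, PySem.Dict.get?_mk_cons]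
    split <;> rfl

theorem dGet?_nil {ν : Type} (k : String) : dGet? ([] : List (String × ν)) k = none := rfl

theorem dGet?_cons {ν : Type} (p : String × ν) (l : List (String × ν)) (k : String) :
    dGet? (p :: l) k = if p.1 == k then some p.2 else dGet? l k := by
  cases p with
  | mk a b => simp only [dGet?, PySem.Dict.get?_mk_cons]

theorem dGet?_filter_ne {ν : Type} (l : List (String × ν)) (k x : String) (hx : ¬ x = k) :
    dGet? (l.filter (fun q => !(q.1 == k))) x = dGet? l x := by
  induction l with
  | nil => rfl
  | cons p rest ih =>
    by_cases hp : p.1 = k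
    · simp [hp, dGet?_cons, ih, Ne.symm hx]
    · simp only [List.filter_cons]
      simp only [beq_iff_eq, dGet?_cons]
      split <;> simp_all [dGet?_cons]

theorem dedupKeys_cons (p : String × List String) (rest : List (String × List String)) :
    dedupKeys (p :: rest) = p :: dedupKeys (rest.filter (fun q => !(q.1 == p.1))) := by
  rw [dedupKeys.eq_def]

theorem dedupKeys_nil : dedupKeys [] = [] := by rw [dedupKeys.eq_def]

theorem mem_of_mem_dedupKeys (l : List (String × List String)) (p : String × List String)
    (h : p ∈ dedupKeys l) : p ∈ l := by
  match l with
  | [] => rw [dedupKeys_nil] at h; exact absurd h (List.not_mem_nil)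
  | q :: rest =>
    rw [dedupKeys_cons] at h
    rcases List.mem_cons.mp h with h | h
    · simp [h]
    · exact List.mem_cons_of_mem _ (List.mem_of_mem_filter (mem_of_mem_dedupKeys _ _ h))
  termination_by l.length
  decreasing_by simp only [List.length_cons]; exact Nat.lt_succ_of_le (List.length_filter_le _ _)

theorem mem_dedupKeys_iff (l : List (String × List String)) (b : String) (v : List String) :
    (b, v) ∈ dedupKeys l ↔ dGet? l b = some v := by
  match l with
  | [] => rw [dedupKeys_nil]; simp [dGet?_nil]
  | p :: rest =>
    have ih := mem_dedupKeys_iff (rest.filter (fun q => !(q.1 == p.1))) b v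
    rw [dedupKeys_cons, dGet?_cons]
    by_cases hb : p.1 = b
    · simp only [hb, beq_self_eq_true, if_pos]
      constructor
      · intro h
        rcases List.mem_cons.mp h with h | h
        · rw [← h]
        · exfalso
          have hm := List.mem_filter.mp (mem_of_mem_dedupKeys _ _ h)
          simp at hm
      · intro h
        obtain ⟨a, w⟩ := p
        obtain rfl : a = b := hb
        obtain rfl : w = v := by simpa using h
        exact List.mem_cons_self ..
    · simp only [beq_iff_eq, hb]
      rw [List.mem_cons]
      constructor
      · rintro (h | h)
        · cases h; simp at hb
        · exact (dGet?_filter_ne rest p.1 b (fun h => hb h.symm)) ▸ ih.mp h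
      · intro h
        right
        exact ih.mpr ((dGet?_filter_ne rest p.1 b (fun h => hb h.symm)).symm ▸ h)
  termination_by l.length
  decreasing_by simp only [List.length_cons]; exact Nat.lt_succ_of_le (List.length_filter_le _ _)

theorem bfs_sound (adj : List (String × List String)) :
    ∀ (fuel : Nat) (q : List String) (vis : PySem.Set String) (x : String),
      x ∈ bfsLoop adj fuel q vis → x ∈ vis ∨ ∃ s ∈ q, Reach adj s x := by
  intro fuel
  induction fuel with
  | zero => intro q vis x hx; exact Or.inl hx
  | succ n ih =>
    intro q vis x hx
    match q with
    | [] => exact Or.inl hx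
    | node :: queue =>
      rw [bfsLoop] at hx
      by_cases hv : PySem.Set.contains vis node
      · rw [if_pos hv] at hx
        rcases ih queue vis x hx with h | ⟨s, hs, hr⟩
        · exact Or.inl h
        · exact Or.inr ⟨s, List.mem_cons_of_mem _ hs, hr⟩
      · rw [if_neg hv] at hx
        rcases ih _ _ x hx with h | ⟨s, hs, hr⟩
        · rcases (PySem.Set.mem_add vis node x).mp h with h | rfl
          · exact Or.inl h
          · exact Or.inr ⟨x, List.mem_cons_self .., Relation.ReflTransGen.refl⟩
        · rcases List.mem_append.mp hs with hs | hs
          · exact Or.inr ⟨s, List.mem_cons_of_mem _ hs, hr⟩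
          · have hstep : stepRel adj node s := List.mem_of_mem_filter hs
            exact Or.inr ⟨node, List.mem_cons_self .., Relation.ReflTransGen.head hstep hr⟩

theorem Ssum_mono (adj : List (String × List String)) (vis vis' : List String)
    (h : ∀ k, k ∈ vis → k ∈ vis') : Ssum adj vis' ≤ Ssum adj vis := by
  unfold Ssum
  induction adj with
  | nil => simp
  | cons p rest ih =>
    simp only [List.map_cons, List.sum_cons]
    apply Nat.add_le_add _ ih
    by_cases hk : p.1 ∈ vis
    · simp [hk, h _ hk]
    · split <;> simp [hk]

theorem Ssum_drop (adj : List (String × List String)) (vis : List String) (node : String)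
    (hn : node ∉ vis) :
    Ssum adj (vis ++ [node]) + (dGetD adj node []).length ≤ Ssum adj vis := by
  induction adj with
  | nil => simp [Ssum, dGetD_nil]
  | cons p rest ih =>
    rw [dGetD_cons]
    by_cases hp : p.1 = node
    · have h1 : (vis ++ [node]).contains node = true := by simp
      have h2 : vis.contains node = false := by simpa using hn
      simp only [Ssum, List.map_cons, List.sum_cons, hp, h1, h2, beq_self_eq_true,
        Bool.false_eq_true, if_true, if_false]
      have := Ssum_mono rest vis (vis ++ [node]) (fun k hk => List.mem_append_left _ hk)
      simp only [Ssum] at this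
      omega
    · have h1 : (vis ++ [node]).contains p.1 = (vis.contains p.1) := by
        simp [hp]
      simp only [Ssum, List.map_cons, List.sum_cons, h1] at *
      have hbe : (p.1 == node) = false := by simpa using hp
      rw [hbe]
      simp only [Bool.false_eq_true, if_false]
      omega

theorem bfs_complete (adj : List (String × List String)) :
    ∀ (fuel : Nat) (q : List String) (vis : PySem.Set String),
      q.length + Ssum adj vis ≤ fuel →
      (∀ a ∈ vis, ∀ b, stepRel adj a b → b ∈ vis ∨ b ∈ q) →
      (∀ a ∈ vis, a ∈ bfsLoop adj fuel q vis) ∧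
      (∀ s ∈ q, s ∈ bfsLoop adj fuel q vis) ∧
      (∀ a ∈ bfsLoop adj fuel q vis, ∀ b, stepRel adj a b → b ∈ bfsLoop adj fuel q vis) := by
  intro fuel
  induction fuel with
  | zero =>
    intro q vis hφ hcl
    have hq : q = [] := List.eq_nil_of_length_eq_zero (by omega)
    subst hq
    refine ⟨fun a ha => ha, by simp, fun a ha b hb => ?_⟩
    simp only [bfsLoop] at *
    rcases hcl a ha b hb with h | h
    · exact h
    · exact absurd h (List.not_mem_nil)
  | succ n ih =>
    intro q vis hφ hcl
    match q with
    | [] =>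
      refine ⟨fun a ha => ha, by simp, fun a ha b hb => ?_⟩
      simp only [bfsLoop] at *
      rcases hcl a ha b hb with h | h
      · exact h
      · exact absurd h (List.not_mem_nil)
    | node :: queue =>
      rw [bfsLoop]
      by_cases hv : PySem.Set.contains vis node
      · rw [if_pos hv]
        have hnode : node ∈ vis := (PySem.Set.contains_iff _ _).mp hv
        have hcl' : ∀ a ∈ vis, ∀ b, stepRel adj a b → b ∈ vis ∨ b ∈ queue := by
          intro a ha b hb
          rcases hcl a ha b hb with h | h
          · exact Or.inl h
          · rcases List.mem_cons.mp h with rfl | h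
            · exact Or.inl hnode
            · exact Or.inr h
        have hφ' : queue.length + Ssum adj vis ≤ n := by
          simp only [List.length_cons] at hφ; omega
        obtain ⟨h1, h2, h3⟩ := ih queue vis hφ' hcl'
        exact ⟨h1, fun s hs => by
          rcases List.mem_cons.mp hs with rfl | hs
          · exact h1 _ hnode
          · exact h2 _ hs, h3⟩
      · rw [if_neg hv]
        have hnode : node ∉ vis := fun h => hv ((PySem.Set.contains_iff _ _).mpr h)
        have hadd : PySem.Set.add vis node = vis ++ [node] := PySem.Set.add_of_not_mem hnode
        set filtered := (dGetD adj node []).filter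
          (fun nbr => !(PySem.Set.contains (PySem.Set.add vis node) nbr)) with hfil
        have hφ' : (queue ++ filtered).length + Ssum adj (PySem.Set.add vis node) ≤ n := by
          rw [hadd]
          have hdrop := Ssum_drop adj vis node hnode
          have hlen : filtered.length ≤ (dGetD adj node []).length :=
            List.length_filter_le _ _
          simp only [List.length_append, List.length_cons] at *
          omega
        have hcl' : ∀ a ∈ PySem.Set.add vis node, ∀ b, stepRel adj a b →
            b ∈ PySem.Set.add vis node ∨ b ∈ queue ++ filtered := by
          intro a ha b hb
          rcases (PySem.Set.mem_add vis node a).mp ha with ha | ha'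
          · rcases hcl a ha b hb with h | h
            · exact Or.inl ((PySem.Set.mem_add vis node b).mpr (Or.inl h))
            · rcases List.mem_cons.mp h with h' | h
              · exact Or.inl ((PySem.Set.mem_add vis node b).mpr (Or.inr h'))
              · exact Or.inr (List.mem_append_left _ h)
          · by_cases hbv : b ∈ PySem.Set.add vis node
            · exact Or.inl hbv
            · refine Or.inr (List.mem_append_right _ ?_)
              rw [hfil]
              rw [ha'] at hb
              refine List.mem_filter.mpr ⟨hb, ?_⟩
              simp only [Bool.not_eq_eq_eq_not, Bool.not_true]
              exact Bool.bool_eq_false (fun h => hbv ((PySem.Set.contains_iff _ _).mp h))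
        obtain ⟨h1, h2, h3⟩ := ih _ _ hφ' hcl'
        refine ⟨fun a ha => h1 _ ((PySem.Set.mem_add vis node a).mpr (Or.inl ha)),
          fun s hs => ?_, h3⟩
        rcases List.mem_cons.mp hs with rfl | hs
        · exact h1 _ ((PySem.Set.mem_add vis s s).mpr (Or.inr rfl))
        · exact h2 _ (List.mem_append_left _ hs)

theorem Ssum_nil_vis (adj : List (String × List String)) :
    Ssum adj [] = (adj.map (fun p => p.2.length)).sum := by
  simp [Ssum]

theorem mem_bfs_iff (adj : List (String × List String)) (seeds : List String) (x : String) :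
    x ∈ bfsLoop adj (bfsFuel adj seeds) seeds PySem.Set.empty ↔ ∃ s ∈ seeds, Reach adj s x := by
  constructor
  · intro h
    rcases bfs_sound adj _ seeds PySem.Set.empty x h with h | h
    · exact absurd h (List.not_mem_nil)
    · exact h
  · rintro ⟨s, hs, hr⟩
    have hφ : seeds.length + Ssum adj [] ≤ bfsFuel adj seeds := by
      rw [Ssum_nil_vis]; unfold bfsFuel; omega
    obtain ⟨_, h2, h3⟩ := bfs_complete adj (bfsFuel adj seeds) seeds PySem.Set.empty hφ
      (by intro a ha; exact absurd ha (List.not_mem_nil))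
    induction hr with
    | refl => exact h2 _ hs
    | tail _ hstep ihr => exact h3 _ ihr _ hstep

-- ---- saturation (B's fixpoint loop) ----

theorem pass_subset (L : List (String × List String)) :
    ∀ (S : PySem.Set String) (b : Bool) (x : String), x ∈ S → x ∈ (L.foldl passStep (S, b)).1 := by
  induction L with
  | nil => intro S b x hx; exact hx
  | cons p rest ih =>
    intro S b x hx
    simp only [List.foldl_cons, passStep]
    split
    · exact ih _ _ _ ((PySem.Set.mem_add S p.1 x).mpr (Or.inl hx))
    · exact ih _ _ _ hx

theorem pass_sound (rev : List (String × List String)) (W : List String)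
    (L : List (String × List String)) (hL : ∀ p ∈ L, dGetD rev p.1 [] = p.2) :
    ∀ (S : PySem.Set String) (b : Bool),
      (∀ x ∈ S, ∃ w ∈ W, Reach rev x w) →
      ∀ x ∈ (L.foldl passStep (S, b)).1, ∃ w ∈ W, Reach rev x w := by
  induction L with
  | nil => intro S b hS x hx; exact hS x hx
  | cons p rest ih =>
    intro S b hS x hx
    have hp := hL p (List.mem_cons_self ..)
    have hL' : ∀ q ∈ rest, dGetD rev q.1 [] = q.2 := fun q hq => hL q (List.mem_cons_of_mem _ hq)
    have ih' := ih hL'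
    simp only [List.foldl_cons, passStep] at hx
    split at hx
    · rename_i hcond
      refine ih' _ _ ?_ x hx
      intro y hy
      rcases (PySem.Set.mem_add S p.1 y).mp hy with hy | rfl
      · exact hS y hy
      · have hany : p.2.any (fun n => PySem.Set.contains S n) = true := by
          simp only [Bool.and_eq_true] at hcond; exact hcond.2
        obtain ⟨n, hn, hnS⟩ := List.any_eq_true.mp hany
        obtain ⟨w, hw, hr⟩ := hS n ((PySem.Set.contains_iff _ _).mp hnS)
        refine ⟨w, hw, Relation.ReflTransGen.head ?_ hr⟩
        show n ∈ dGetD rev p.1 []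
        rw [hp]; exact hn
    · exact ih' _ _ hS x hx

theorem pass_flag_stays (L : List (String × List String)) (S : PySem.Set String) :
    (L.foldl passStep (S, true)).2 = true := by
  induction L generalizing S with
  | nil => rfl
  | cons p rest ih =>
    simp only [List.foldl_cons, passStep]
    split
    · exact ih _
    · exact ih S

theorem pass_false_fix (L : List (String × List String)) :
    ∀ (S : PySem.Set String), (L.foldl passStep (S, false)).2 = false →
      (L.foldl passStep (S, false)).1 = S ∧
      ∀ p ∈ L, PySem.Set.contains S p.1 = true ∨ p.2.any (fun n => PySem.Set.contains S n) = false := by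
  induction L with
  | nil => intro S _; exact ⟨rfl, by simp⟩
  | cons p rest ih =>
    intro S hfalse
    simp only [List.foldl_cons, passStep] at hfalse ⊢
    by_cases hcond : (!(PySem.Set.contains S p.1) && p.2.any (fun n => PySem.Set.contains S n)) = true
    · rw [if_pos hcond] at hfalse
      exact absurd hfalse (by simp [pass_flag_stays])
    · rw [if_neg hcond] at hfalse ⊢
      obtain ⟨h1, h2⟩ := ih S hfalse
      refine ⟨h1, ?_⟩
      intro q hq
      rcases List.mem_cons.mp hq with rfl | hq
      · by_cases hc1 : PySem.Set.contains S q.1 = true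
        · exact Or.inl hc1
        · right
          cases hany : q.2.any (fun n => PySem.Set.contains S n)
          · rfl
          · have hcf := eq_false_of_ne_true hc1
            exact absurd (by rw [Bool.and_eq_true]; exact ⟨by rw [hcf]; rfl, hany⟩) hcond
      · exact h2 q hq

theorem pass_true_witness (L : List (String × List String)) :
    ∀ (S : PySem.Set String), (L.foldl passStep (S, false)).2 = true →
      ∃ p ∈ L, PySem.Set.contains S p.1 = false ∧ p.1 ∈ (L.foldl passStep (S, false)).1 := by
  induction L with
  | nil => intro S h; exact absurd h (by simp [List.foldl_nil])
  | cons p rest ih =>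
    intro S htrue
    simp only [List.foldl_cons, passStep] at htrue ⊢
    by_cases hcond : (!(PySem.Set.contains S p.1) && p.2.any (fun n => PySem.Set.contains S n)) = true
    · rw [if_pos hcond]
      refine ⟨p, List.mem_cons_self .., ?_, ?_⟩
      · have := (Bool.and_eq_true .. |>.mp hcond).1
        simpa using this
      · exact pass_subset rest _ _ _ ((PySem.Set.mem_add S p.1 p.1).mpr (Or.inr rfl))
    · rw [if_neg hcond]
      rw [if_neg hcond] at htrue
      obtain ⟨q, hq, h1, h2⟩ := ih S htrue
      exact ⟨q, List.mem_cons_of_mem _ hq, h1, h2⟩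

theorem length_filter_le_mono {α : Type} (L : List α) (P Q : α → Bool)
    (hmono : ∀ a ∈ L, Q a = true → P a = true) :
    (L.filter Q).length ≤ (L.filter P).length := by
  induction L with
  | nil => simp
  | cons a rest ih =>
    have ihr := ih (fun b hb hq => hmono b (List.mem_cons_of_mem _ hb) hq)
    simp only [List.filter_cons]
    cases hQa : Q a
    · cases hPa : P a <;> simp <;> omega
    · rw [hmono a (List.mem_cons_self ..) hQa]
      simpa using ihr

theorem length_filter_lt {α : Type} (L : List α) (P Q : α → Bool)
    (hmono : ∀ a ∈ L, Q a = true → P a = true) (a0 : α) (ha0 : a0 ∈ L)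
    (hP : P a0 = true) (hQ : Q a0 = false) :
    (L.filter Q).length < (L.filter P).length := by
  induction L with
  | nil => exact absurd ha0 (List.not_mem_nil)
  | cons a rest ih =>
    simp only [List.filter_cons]
    rcases List.mem_cons.mp ha0 with rfl | ha0
    · rw [if_pos hP, if_neg (by simp [hQ])]
      have := length_filter_le_mono rest P Q
        (fun b hb hq => hmono b (List.mem_cons_of_mem _ hb) hq)
      simp only [List.length_cons]
      omega
    · have ihr := ih (fun b hb hq => hmono b (List.mem_cons_of_mem _ hb) hq) ha0
      cases hQa : Q a
      · simp only [Bool.false_eq_true, if_false]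
        cases hPa : P a <;> simp [ihr] <;> omega
      · rw [hmono a (List.mem_cons_self ..) hQa]
        simpa using ihr

theorem satLoop_fix (L : List (String × List String)) :
    ∀ (fuel : Nat) (S : PySem.Set String),
      (L.filter (fun p => !(PySem.Set.contains S p.1))).length < fuel →
      (∀ x ∈ S, x ∈ satLoop L fuel S) ∧
      ∀ p ∈ L, PySem.Set.contains (satLoop L fuel S) p.1 = true ∨
        p.2.any (fun n => PySem.Set.contains (satLoop L fuel S) n) = false := by
  intro fuel
  induction fuel with
  | zero => intro S h; exact absurd h (by omega)
  | succ f ih =>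
    intro S hm
    rw [satLoop]
    cases hflag : (onePass L S).2
    · simp only [hflag, Bool.false_eq_true, if_false]
      obtain ⟨h1, h2⟩ := pass_false_fix L S hflag
      rw [show (onePass L S).1 = S from h1]
      exact ⟨fun x hx => hx, h2⟩
    · simp only [hflag, if_true]
      have hsub : ∀ x ∈ S, x ∈ (onePass L S).1 := fun x hx => pass_subset L S false x hx
      obtain ⟨p0, hp0, hf, hmem⟩ := pass_true_witness L S hflag
      have hdec : (L.filter (fun p => !(PySem.Set.contains (onePass L S).1 p.1))).length
          < (L.filter (fun p => !(PySem.Set.contains S p.1))).length := by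
        refine length_filter_lt L _ _ ?_ p0 hp0 ?_ ?_
        · intro a _ hq
          cases hca : PySem.Set.contains S a.1
          · rfl
          · exfalso
            have : a.1 ∈ (onePass L S).1 := hsub a.1 ((PySem.Set.contains_iff _ _).mp hca)
            rw [(PySem.Set.contains_iff _ _).mpr this] at hq
            simp at hq
        · rw [hf]; rfl
        · have hmem' : PySem.Set.contains (onePass L S).1 p0.1 = true :=
            (PySem.Set.contains_iff _ _).mpr hmem
          rw [hmem']; rfl
      obtain ⟨h1, h2⟩ := ih (onePass L S).1 (by omega)
      exact ⟨fun x hx => h1 x (hsub x hx), h2⟩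

theorem satLoop_sound (rev : List (String × List String)) (W : List String)
    (L : List (String × List String)) (hL : ∀ p ∈ L, dGetD rev p.1 [] = p.2) :
    ∀ (fuel : Nat) (S : PySem.Set String),
      (∀ x ∈ S, ∃ w ∈ W, Reach rev x w) →
      ∀ x ∈ satLoop L fuel S, ∃ w ∈ W, Reach rev x w := by
  intro fuel
  induction fuel with
  | zero => intro S hS x hx; exact hS x hx
  | succ f ih =>
    intro S hS x hx
    rw [satLoop] at hx
    have hpass := pass_sound rev W L hL S false hS
    cases hflag : (onePass L S).2 <;> rw [hflag] at hx
    · simp only [Bool.false_eq_true, if_false] at hx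
      exact hpass x hx
    · simp only [if_true] at hx
      exact ih (onePass L S).1 hpass x hx

theorem covered_iff (rev : List (String × List String)) (W : List String) (x : String) :
    x ∈ satLoop (dedupKeys rev) ((dedupKeys rev).length + 1) (PySem.Set.ofList W) ↔
      ∃ w ∈ W, Reach rev x w := by
  have hL : ∀ p ∈ dedupKeys rev, dGetD rev p.1 [] = p.2 := by
    intro p hp
    obtain ⟨a, b⟩ := p
    have := (mem_dedupKeys_iff rev a b).mp hp
    show (PySem.Dict.mk rev).getD a [] = b
    rw [PySem.Dict.getD_eq_get?_getD]
    show ((dGet? rev a).getD []) = b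
    rw [this]
    rfl
  constructor
  · apply satLoop_sound rev W (dedupKeys rev) hL
    intro y hy
    exact ⟨y, (PySem.Set.mem_ofList _ _).mp hy, Relation.ReflTransGen.refl⟩
  · rintro ⟨w, hw, hr⟩
    have hfuel : ((dedupKeys rev).filter
        (fun p => !(PySem.Set.contains (PySem.Set.ofList W) p.1))).length
        < (dedupKeys rev).length + 1 :=
      Nat.lt_succ_of_le (List.length_filter_le _ _)
    obtain ⟨h1, h2⟩ := satLoop_fix (dedupKeys rev) ((dedupKeys rev).length + 1)
      (PySem.Set.ofList W) hfuel
    clear hfuel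
    induction hr using Relation.ReflTransGen.head_induction_on with
    | refl => exact h1 w ((PySem.Set.mem_ofList _ _).mpr hw)
    | head hstep _ ihb =>
      rename_i a b _
      have hb : b ∈ satLoop (dedupKeys rev) ((dedupKeys rev).length + 1) (PySem.Set.ofList W) := ihb
      have hget : dGet? rev a = some (dGetD rev a []) := by
        have hne : dGetD rev a [] ≠ [] := by
          intro hnil
          have : b ∈ dGetD rev a [] := hstep
          rw [hnil] at this
          exact absurd this (List.not_mem_nil)
        show (PySem.Dict.mk rev).get? a = some (dGetD rev a [])
        cases hg : (PySem.Dict.mk rev).get? a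
        · exfalso
          apply hne
          show (PySem.Dict.mk rev).getD a [] = []
          rw [PySem.Dict.getD_eq_get?_getD, hg]
          rfl
        · congr 1
          show _ = (PySem.Dict.mk rev).getD a []
          rw [PySem.Dict.getD_eq_get?_getD, hg]
          rfl
      have hpmem : (a, dGetD rev a []) ∈ dedupKeys rev := (mem_dedupKeys_iff rev a _).mpr hget
      rcases h2 (a, dGetD rev a []) hpmem with h | h
      · exact (PySem.Set.contains_iff _ _).mp h
      · exfalso
        have : ((dGetD rev a []).any
            (fun n => PySem.Set.contains (satLoop (dedupKeys rev) ((dedupKeys rev).length + 1)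
              (PySem.Set.ofList W)) n)) = true :=
          List.any_eq_true.mpr ⟨b, hstep, (PySem.Set.contains_iff _ _).mpr hb⟩
        rw [h] at this
        exact absurd this (by simp)

theorem reader_check_eq (rev : List (String × List String)) (writers : List String) (r : String) :
    (writers.any (fun w => PySem.Set.contains (reachableFrom r rev) w))
      = PySem.Set.contains
          (satLoop (dedupKeys rev) ((dedupKeys rev).length + 1) (PySem.Set.ofList writers)) r := by
  rw [Bool.eq_iff_iff]
  simp only [List.any_eq_true, PySem.Set.contains_iff]
  rw [covered_iff]
  unfold reachableFrom
  constructor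
  · rintro ⟨w, hw, hmem⟩
    obtain ⟨s, hs, hr⟩ := (mem_bfs_iff rev [r] w).mp hmem
    rw [List.mem_singleton] at hs
    rw [hs] at hr
    exact ⟨w, hw, hr⟩
  · rintro ⟨w, hw, hr⟩
    exact ⟨w, hw, (mem_bfs_iff rev [r] w).mpr ⟨r, List.mem_singleton.mpr rfl, hr⟩⟩

-- ---- grouping: A's dicts versus B's event-list scans ----

def grp (k : String) (ps : List (String × String)) : List String :=
  (ps.filter (fun p => p.1 == k)).map (fun p => p.2)

-- new keys of a pair list in first-occurrence order, given the keys already seen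
def fo (seen : List String) : List String → List String
  | [] => []
  | k :: ks => if seen.contains k then fo seen ks else k :: fo (seen ++ [k]) ks

def rdPairs (evs : List (String × String × String)) : List (String × String) :=
  evs.filterMap (fun v => if v.1 == "read" then some (v.2.1, v.2.2) else none)

def wrPairs (evs : List (String × String × String)) : List (String × String) :=
  evs.filterMap (fun v => if v.1 == "write" then some (v.2.1, v.2.2) else none)

def bstep (d : PySem.Dict String (List String)) (p : String × String) :
    PySem.Dict String (List String) :=
  d.modify p.1 [] (fun l => l ++ [p.2])

theorem collectA_split (entities : List (String × List (String × String)))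
    (edges : List (List (String × String))) :
    ∀ (d1 d2 : PySem.Dict String (List String)),
      edges.foldl (fun rw e =>
        let etype := dGetD e "type" ""
        let src := dGetD e "from" ""
        let tgt := dGetD e "to" ""
        if etype == "read" && isStoreEnt entities tgt then
          (rw.1.modify tgt [] (fun l => l ++ [src]), rw.2)
        else if etype == "write" && isStoreEnt entities tgt then
          (rw.1, rw.2.modify tgt [] (fun l => l ++ [src]))
        else rw) (d1, d2)
      = ((rdPairs (storeEvents entities edges)).foldl bstep d1,
         (wrPairs (storeEvents entities edges)).foldl bstep d2) := by
  induction edges with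
  | nil => intro d1 d2; simp [storeEvents, rdPairs, wrPairs]
  | cons e rest ih =>
    intro d1 d2
    have hev : storeEvents entities (e :: rest)
        = if ((dGetD e "type" "" == "read" || dGetD e "type" "" == "write")
              && isStoreEnt entities (dGetD e "to" "")) = true
          then evOf e :: storeEvents entities rest else storeEvents entities rest := by
      simp only [storeEvents, List.map_cons, List.filter_cons, evOf]
    simp only [List.foldl_cons]
    cases hr : (dGetD e "type" "" == "read") <;>
      cases hw : (dGetD e "type" "" == "write") <;>
      cases hs : isStoreEnt entities (dGetD e "to" "") <;>
      first
      | (exfalso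
         have h1 := beq_iff_eq.mp hr
         have h2 := beq_iff_eq.mp hw
         rw [h1] at h2
         exact absurd h2 (by decide))
      | (simp only [Bool.false_and, Bool.true_and, Bool.and_false, Bool.and_true,
            Bool.and_self, Bool.or_self, Bool.false_eq_true, Bool.true_eq_false,
            eq_self_iff_true, if_true, if_false, reduceIte]
         rw [ih, hev]
         simp only [evOf, hr, hw, hs, Bool.false_or, Bool.or_false, Bool.true_or,
            Bool.or_true, Bool.false_and, Bool.true_and, Bool.and_false, Bool.and_true,
            Bool.and_self, Bool.or_self, Bool.false_eq_true, Bool.true_eq_false,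
            eq_self_iff_true, if_true, if_false, reduceIte, rdPairs, wrPairs,
            List.filterMap_cons, List.foldl_cons, bstep])

theorem fo_not_mem (l seen : List String) (x : String) (h : x ∈ fo seen l) : x ∉ seen := by
  induction l generalizing seen with
  | nil => simp [fo] at h
  | cons k ks ih =>
    rw [fo] at h
    split at h
    · exact ih seen h
    · rename_i hk
      rcases List.mem_cons.mp h with rfl | h
      · intro hm
        exact hk (by simpa using hm)
      · intro hm
        exact (ih _ h) (List.mem_append_left _ hm)

theorem build_items (ps : List (String × String)) :
    ∀ (d : PySem.Dict String (List String)), d.keys.Nodup →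
      (ps.foldl bstep d).items
        = d.items.map (fun kv => (kv.1, kv.2 ++ grp kv.1 ps))
          ++ (fo (d.items.map (fun kv => kv.1)) (ps.map (fun p => p.1))).map
              (fun k => (k, grp k ps)) := by
  induction ps with
  | nil =>
    intro d _
    simp [grp, fo]
  | cons q ps ih =>
    obtain ⟨k, v⟩ := q
    intro d hnd
    have hins : bstep d (k, v) = d.insert k (d.getD k [] ++ [v]) := rfl
    rw [List.foldl_cons, hins]
    by_cases hC : d.contains k = true
    · have hitems : (d.insert k (d.getD k [] ++ [v])).items
          = d.items.map (fun p => if (p.1 == k) = true then (k, d.getD k [] ++ [v]) else p) :=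
        PySem.Dict.items_insert_of_contains d _ hC
      have hkeys : (d.insert k (d.getD k [] ++ [v])).items.map (fun kv => kv.1)
          = d.items.map (fun kv => kv.1) := by
        rw [hitems, List.map_map]
        apply List.map_congr_left
        intro p _
        show (if (p.1 == k) = true then (k, d.getD k [] ++ [v]) else p).1 = p.1
        by_cases hpk : (p.1 == k) = true
        · rw [if_pos hpk]
          exact (beq_iff_eq.mp hpk).symm
        · rw [if_neg hpk]
      have hnd' : (d.insert k (d.getD k [] ++ [v])).keys.Nodup := by
        show ((d.insert k (d.getD k [] ++ [v])).items.map (fun kv => kv.1)).Nodup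
        rw [hkeys]
        exact hnd
      rw [ih _ hnd', hkeys, hitems, List.map_map]
      have hkmem : k ∈ d.items.map (fun kv => kv.1) := (PySem.Dict.contains_iff_mem_keys d k).mp hC
      have hfo : fo (d.items.map (fun kv => kv.1)) (((k, v) :: ps).map (fun p => p.1))
          = fo (d.items.map (fun kv => kv.1)) (ps.map (fun p => p.1)) := by
        simp only [List.map_cons, fo]
        rw [if_pos (by simpa using hkmem)]
      rw [hfo]
      congr 1
      · apply List.map_congr_left
        intro p hp
        show (fun kv => (kv.1, kv.2 ++ grp kv.1 ps))
            (if (p.1 == k) = true then (k, d.getD k [] ++ [v]) else p)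
          = (p.1, p.2 ++ grp p.1 ((k, v) :: ps))
        by_cases hpk : (p.1 == k) = true
        · have hk1 : p.1 = k := beq_iff_eq.mp hpk
          subst hk1
          have hget : d.getD p.1 [] = p.2 :=
            PySem.Dict.getD_of_mem_items d (by simpa using hp) hnd []
          have hgrp : grp p.1 ((p.1, v) :: ps) = v :: grp p.1 ps := by
            simp [grp, List.filter_cons]
          rw [if_pos hpk, hget, hgrp]
          simp
        · have hk1 : ¬ p.1 = k := fun h => hpk (beq_iff_eq.mpr h)
          have hgrp : grp p.1 ((k, v) :: ps) = grp p.1 ps := by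
            simp only [grp, List.filter_cons]
            rw [if_neg (by simpa using fun h => hk1 h.symm)]
          rw [if_neg hpk, hgrp]
      · apply List.map_congr_left
        intro x hx
        have hxk : ¬ x = k := by
          intro h
          exact fo_not_mem _ _ x hx (h ▸ hkmem)
        have hgrp : grp x ((k, v) :: ps) = grp x ps := by
          simp only [grp, List.filter_cons]
          rw [if_neg (by simpa using fun h => hxk h.symm)]
        rw [hgrp]
    · have hC' : d.contains k = false := eq_false_of_ne_true hC
      have hitems : (d.insert k (d.getD k [] ++ [v])).items = d.items ++ [(k, [v])] := by
        rw [PySem.Dict.items_insert_of_not_contains d _ hC', PySem.Dict.getD_of_not_contains d _ hC']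
        rfl
      have hkeys : (d.insert k (d.getD k [] ++ [v])).items.map (fun kv => kv.1)
          = d.items.map (fun kv => kv.1) ++ [k] := by
        rw [hitems]; simp
      have hkmem : ¬ k ∈ d.items.map (fun kv => kv.1) := by
        intro hm
        rw [(PySem.Dict.contains_iff_mem_keys d k).mpr hm] at hC'
        exact absurd hC' (by simp)
      have hnd' : (d.insert k (d.getD k [] ++ [v])).keys.Nodup := by
        show ((d.insert k (d.getD k [] ++ [v])).items.map (fun kv => kv.1)).Nodup
        rw [hkeys]
        simp only [List.nodup_append, List.nodup_singleton, true_and, and_true]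
        refine ⟨hnd, ?_⟩
        intro a ha b hb
        rw [List.mem_singleton] at hb
        intro hab
        rw [hb] at hab
        rw [hab] at ha
        exact hkmem ha
      rw [ih _ hnd', hkeys, hitems]
      have hfo : fo (d.items.map (fun kv => kv.1)) (((k, v) :: ps).map (fun p => p.1))
          = k :: fo (d.items.map (fun kv => kv.1) ++ [k]) (ps.map (fun p => p.1)) := by
        simp only [List.map_cons, fo]
        rw [if_neg (by simpa using hkmem)]
      rw [hfo]
      have hgrpk : grp k ((k, v) :: ps) = v :: grp k ps := by
        simp [grp, List.filter_cons]
      have hmapitems : (d.items ++ [(k, [v])]).map (fun kv => (kv.1, kv.2 ++ grp kv.1 ps))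
          = d.items.map (fun kv => (kv.1, kv.2 ++ grp kv.1 ps)) ++ [(k, [v] ++ grp k ps)] := by
        simp
      rw [hmapitems]
      have hmain : d.items.map (fun kv => (kv.1, kv.2 ++ grp kv.1 ps))
          = d.items.map (fun kv => (kv.1, kv.2 ++ grp kv.1 ((k, v) :: ps))) := by
        apply List.map_congr_left
        intro p hp
        have hk1 : ¬ p.1 = k := by
          intro h
          exact hkmem (h ▸ (List.mem_map_of_mem hp : p.1 ∈ d.items.map (fun kv => kv.1)))
        have hgrp : grp p.1 ((k, v) :: ps) = grp p.1 ps := by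
          simp only [grp, List.filter_cons]
          rw [if_neg (by simpa using fun h => hk1 h.symm)]
        rw [hgrp]
      have htail : (fo (d.items.map (fun kv => kv.1) ++ [k]) (ps.map (fun p => p.1))).map
            (fun k' => (k', grp k' ps))
          = (fo (d.items.map (fun kv => kv.1) ++ [k]) (ps.map (fun p => p.1))).map
            (fun k' => (k', grp k' ((k, v) :: ps))) := by
        apply List.map_congr_left
        intro x hx
        have hxk : ¬ x = k := by
          intro h
          exact fo_not_mem _ _ x hx (by simp [h])
        have hgrp : grp x ((k, v) :: ps) = grp x ps := by
          simp only [grp, List.filter_cons]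
          rw [if_neg (by simpa using fun h => hxk h.symm)]
        rw [hgrp]
      rw [hmain]
      simp only [List.map_cons]
      rw [hgrpk, ← htail]
      simp

theorem grp_rd (evs : List (String × String × String)) (k : String) :
    grp k (rdPairs evs) = readersOf evs k := by
  induction evs with
  | nil => rfl
  | cons v rest ih =>
    simp only [grp, readersOf] at ih ⊢
    cases hr : (v.1 == "read")
    · simp only [rdPairs, List.filterMap_cons, List.filter_cons, hr,
        Bool.false_and, Bool.false_eq_true, if_false] at ih ⊢
      exact ih
    · cases hk : (v.2.1 == k)
      · simp only [rdPairs, List.filterMap_cons, List.filter_cons, hr, hk, if_true,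
          Bool.true_and, Bool.false_eq_true, if_false] at ih ⊢
        exact ih
      · simp only [rdPairs, List.filterMap_cons, List.filter_cons, hr, hk, if_true,
          Bool.true_and, List.map_cons] at ih ⊢
        rw [ih]

theorem grp_wr (evs : List (String × String × String)) (k : String) :
    grp k (wrPairs evs) = writersOf evs k := by
  induction evs with
  | nil => rfl
  | cons v rest ih =>
    simp only [grp, writersOf] at ih ⊢
    cases hr : (v.1 == "write")
    · simp only [wrPairs, List.filterMap_cons, List.filter_cons, hr,
        Bool.false_and, Bool.false_eq_true, if_false] at ih ⊢
      exact ih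
    · cases hk : (v.2.1 == k)
      · simp only [wrPairs, List.filterMap_cons, List.filter_cons, hr, hk, if_true,
          Bool.true_and, Bool.false_eq_true, if_false] at ih ⊢
        exact ih
      · simp only [wrPairs, List.filterMap_cons, List.filter_cons, hr, hk, if_true,
          Bool.true_and, List.map_cons] at ih ⊢
        rw [ih]

theorem readStoresLoop_spec (evs : List (String × String × String)) :
    ∀ (acc : List String), readStoresLoop evs acc = acc ++ fo acc ((rdPairs evs).map (fun p => p.1)) := by
  induction evs with
  | nil => intro acc; simp [readStoresLoop, rdPairs, fo]
  | cons v rest ih =>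
    intro acc
    rw [readStoresLoop]
    cases hr : (v.1 == "read")
    · have hstep : rdPairs (v :: rest) = rdPairs rest := by
        simp only [rdPairs, List.filterMap_cons, hr, Bool.false_eq_true, if_false]
      rw [hstep]
      simp only [Bool.false_and, Bool.false_eq_true, if_false]
      exact ih acc
    · have hstep : rdPairs (v :: rest) = (v.2.1, v.2.2) :: rdPairs rest := by
        simp only [rdPairs, List.filterMap_cons, hr, if_true]
      rw [hstep]
      simp only [List.map_cons, fo, Bool.true_and]
      cases hc : acc.contains v.2.1
      · simp only [Bool.not_false, if_true, Bool.false_eq_true, if_false]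
        rw [ih (acc ++ [v.2.1])]
        simp
      · simp only [Bool.not_true, Bool.false_eq_true, if_false, if_true]
        exact ih acc

theorem store_reads_items (entities : List (String × List (String × String)))
    (edges : List (List (String × String))) :
    (collectA entities edges).1.items
      = (readStoresLoop (storeEvents entities edges) []).map
          (fun t => (t, readersOf (storeEvents entities edges) t)) := by
  unfold collectA
  rw [collectA_split]
  show ((rdPairs (storeEvents entities edges)).foldl bstep PySem.Dict.empty).items = _
  rw [build_items _ PySem.Dict.empty PySem.Dict.nodup_keys_empty]
  rw [readStoresLoop_spec (storeEvents entities edges) []]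
  simp only [List.nil_append]
  have hempty : (PySem.Dict.empty : PySem.Dict String (List String)).items = [] := rfl
  rw [hempty]
  simp only [List.map_nil, List.nil_append]
  apply List.map_congr_left
  intro t _
  rw [grp_rd]

theorem store_writes_getD (entities : List (String × List (String × String)))
    (edges : List (List (String × String))) (t : String) :
    (collectA entities edges).2.getD t [] = writersOf (storeEvents entities edges) t := by
  unfold collectA
  rw [collectA_split]
  show ((wrPairs (storeEvents entities edges)).foldl
      (fun d p => d.modify p.1 [] (fun l => l ++ [p.2])) PySem.Dict.empty).getD t [] = _
  rw [PySem.Dict.getD_foldl_modify_append]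
  rw [← grp_wr]
  simp [grp]

theorem readers_fold_eq (C : String → Bool) (m : String → String)
    (readers : List String) (ws : List String) :
    readers.foldl (fun ws2 r => if C r then ws2 else ws2 ++ [m r]) ws
      = ws ++ (readers.filter (fun r => !(C r))).map m := by
  have hfun : (fun (ws2 : List String) r => if C r then ws2 else ws2 ++ [m r])
      = (fun acc x => if (!(C x)) = true then acc ++ [m x] else acc) := by
    funext ws2 r
    cases hC : C r <;> simp
  rw [hfun, PySem.List.foldl_append_if]

theorem main_eq (spec : List (String × String)) (entities : List (String × List (String × String))) (processes : List (String × List (String × String))) (schemas : List (String × List (String × String))) (edges : List (List (String × String))) (fwd : List (String × List String)) (rev : List (String × List String)) :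
    check_store_consistency spec entities processes schemas edges fwd rev = check_store_consistency_alt spec entities processes schemas edges fwd rev := by
  show (let entry := dGetD spec "entry_point" ""
        let srw := collectA entities edges
        if srw.1.items.isEmpty then (([] : List String), ([] : List String))
        else ([], srw.1.items.foldl (fun ws si =>
          if (srw.2.getD si.1 []).isEmpty then
            if (["vector", "document", "knowledge_base"] : List String).contains
                (dGetD (dGetD entities si.1 []) "store_type" "") then ws
            else ws ++ [msgNeverWritten si.1 si.2]
          else if entry == "" then ws
          else
            si.2.foldl (fun ws2 reader_pid =>
              if (srw.2.getD si.1 []).any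
                  (fun w => PySem.Set.contains (reachableFrom reader_pid rev) w) then ws2
              else ws2 ++ [msgNoPrecede reader_pid si.1]) ws) []))
      = (let entry := dGetD spec "entry_point" ""
         let events := storeEvents entities edges
         let read_stores := readStoresLoop events []
         if read_stores.isEmpty then (([] : List String), ([] : List String))
         else ([], read_stores.foldl
             (fun ws t => ws ++ storeWarnings t events entities entry rev) []))
  simp only []
  rw [store_reads_items]
  rw [List.isEmpty_map]
  by_cases hempty : (readStoresLoop (storeEvents entities edges) []).isEmpty
  · simp only [hempty, if_true]
  · simp only [hempty, Bool.false_eq_true, if_false]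
    refine congrArg (fun w => (([] : List String), w)) ?_
    have hstepA : (fun (ws : List String) (si : String × List String) =>
        if ((collectA entities edges).2.getD si.1 []).isEmpty then
          if (["vector", "document", "knowledge_base"] : List String).contains
              (dGetD (dGetD entities si.1 []) "store_type" "") then ws
          else ws ++ [msgNeverWritten si.1 si.2]
        else if dGetD spec "entry_point" "" == "" then ws
        else
          si.2.foldl (fun ws2 reader_pid =>
            if ((collectA entities edges).2.getD si.1 []).any
                (fun w => PySem.Set.contains (reachableFrom reader_pid rev) w) then ws2
            else ws2 ++ [msgNoPrecede reader_pid si.1]) ws)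
      = (fun ws si => ws ++
          (if ((collectA entities edges).2.getD si.1 []).isEmpty then
            if (["vector", "document", "knowledge_base"] : List String).contains
                (dGetD (dGetD entities si.1 []) "store_type" "") then []
            else [msgNeverWritten si.1 si.2]
          else if dGetD spec "entry_point" "" == "" then []
          else
            (si.2.filter (fun r => !(((collectA entities edges).2.getD si.1 []).any
                (fun w => PySem.Set.contains (reachableFrom r rev) w)))).map
              (fun r => msgNoPrecede r si.1))) := by
      funext ws si
      by_cases h1 : ((collectA entities edges).2.getD si.1 []).isEmpty = true
      · simp only [h1, if_true]
        by_cases h2 : (["vector", "document", "knowledge_base"] : List String).contains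
            (dGetD (dGetD entities si.1 []) "store_type" "") = true
        · simp only [h2, if_true]
          simp
        · simp only [eq_false_of_ne_true h2, Bool.false_eq_true, if_false]
      · simp only [h1, Bool.false_eq_true, if_false]
        by_cases h2 : (dGetD spec "entry_point" "" == "") = true
        · simp only [h2, if_true]
          simp
        · simp only [eq_false_of_ne_true h2, Bool.false_eq_true, if_false]
          exact readers_fold_eq _ _ si.2 ws
    rw [hstepA, PySem.List.foldl_append_eq_flatMap, PySem.List.foldl_append_eq_flatMap,
      List.nil_append, List.nil_append, List.flatMap_map]
    congr 1
    funext t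
    simp only [storeWarnings]
    rw [store_writes_getD]
    by_cases h1 : (writersOf (storeEvents entities edges) t).isEmpty = true
    · simp only [h1, if_true]
    · simp only [h1, Bool.false_eq_true, if_false]
      by_cases h2 : (dGetD spec "entry_point" "" == "") = true
      · simp only [h2, if_true]
      · simp only [eq_false_of_ne_true h2, Bool.false_eq_true, if_false]
        congr 1
        apply List.filter_congr
        intro r _
        rw [reader_check_eq]

-- ===== VERDICT (by name: the statement is the Claim_ definition above) =====
theorem check_store_consistency_spec : Claim_equal_check_store_consistency := by
  intro spec entities processes schemas edges fwd rev _dom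
  unfold Spec_check_store_consistency
  exact main_eq spec entities processes schemas edges fwd rev
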